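-- pv_equiv track=rewrite | github.com/niklaskrauth/application-information-backend | app/services/web_scraper.py | _categorize_link
-- ===== SOURCE A (Python) =====
-- def _categorize_link(url: str) -> str:
--     """Categorize a link by its file extension or content type"""
--     url_lower = url.lower()
--
--     if url_lower.endswith('.pdf'):
--         return 'pdf'
--     elif any(url_lower.endswith(ext) for ext in ['.jpg', '.jpeg', '.png', '.gif', '.bmp', '.svg']):
--         return 'image'
--     else:
--         return 'webpage'
-- ===== SOURCE B (Python) =====
-- _EXT = {'pdf': 'pdf', 'jpg': 'image', 'jpeg': 'image', 'png': 'image',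
--         'gif': 'image', 'bmp': 'image', 'svg': 'image'}
--
--
-- def _categorize_link(url: str) -> str:
--     u = url.lower()
--     ext = u.rsplit('.', 1)[1] if '.' in u else None
--     return _EXT.get(ext, 'webpage')
-- ===== Notes on version B (the rewrite author's own statement) =====
-- stated objective: simpler
-- what changed: Replaces the sequential endswith chain / any-suffix scan with a single parse (extract the text after the last dot once) followed by one table lookup in a constant extension->category dict.
import Mathlib
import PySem

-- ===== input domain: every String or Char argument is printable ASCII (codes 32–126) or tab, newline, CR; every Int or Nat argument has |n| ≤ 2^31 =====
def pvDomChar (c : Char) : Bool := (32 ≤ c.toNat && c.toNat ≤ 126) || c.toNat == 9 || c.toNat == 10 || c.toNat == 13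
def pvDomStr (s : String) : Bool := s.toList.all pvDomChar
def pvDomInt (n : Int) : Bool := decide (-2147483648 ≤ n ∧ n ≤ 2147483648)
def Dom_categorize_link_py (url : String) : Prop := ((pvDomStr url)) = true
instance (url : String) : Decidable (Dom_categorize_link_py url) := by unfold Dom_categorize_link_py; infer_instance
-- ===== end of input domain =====

-- B replaces A's sequential endswith chain by extracting the text after the last dot
-- once and looking it up in a constant extension→category table (objective: simpler).

-- ===== PORT A =====
def categorize_link_py (url : String) : String :=
  let url_lower := PySem.Str.lower url
  if PySem.Str.endswith url_lower ".pdf" then "pdf"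
  else if [".jpg", ".jpeg", ".png", ".gif", ".bmp", ".svg"].any
      (fun ext => PySem.Str.endswith url_lower ext) then "image"
  else "webpage"

-- ===== PORT B =====
-- the module-level _EXT dict
def pvExtTable : PySem.Dict (List Char) String :=
  (((((((PySem.Dict.empty).insert "pdf".toList "pdf").insert "jpg".toList "image").insert
      "jpeg".toList "image").insert "png".toList "image").insert "gif".toList
      "image").insert "bmp".toList "image").insert "svg".toList "image"

def categorize_link_py_alt (url : String) : String :=
  let u := (PySem.Str.lower url).toList
  -- hand port of «u.rsplit('.', 1)[1] if '.' in u else None» (exact: when u contains a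
  -- dot, rsplit('.', 1)[1] is the text after the LAST dot)
  let ext : Option (List Char) :=
    if '.' ∈ u then some ((u.reverse.takeWhile (· ≠ '.')).reverse) else none
  -- _EXT.get(ext, 'webpage'); None is never a key of _EXT
  match ext with
  | some e => PySem.Dict.getD pvExtTable e "webpage"
  | none => "webpage"

-- ===== PRECONDITION & SPEC =====
def Spec_categorize_link_py (url : String) (out : String) : Prop := out = categorize_link_py_alt url
instance (url : String) (out : String) : Decidable (Spec_categorize_link_py url out) := by unfold Spec_categorize_link_py; infer_instance

-- ===== CLAIM (what is proved, stated in full; the proofs are below) =====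
def Claim_equal_categorize_link_py : Prop := ∀ (url : String), Dom_categorize_link_py url → Spec_categorize_link_py url (categorize_link_py url)

-- ===== LEMMAS AND PROOFS =====

-- a dot-free block before a dot is exactly what takeWhile (· ≠ '.') collects
lemma pv_takeWhile_all (v t : List Char) (hv : '.' ∉ v) :
    (v ++ '.' :: t).takeWhile (· ≠ '.') = v := by
  induction v with
  | nil =>
    rw [List.nil_append, List.takeWhile_cons, if_neg (by decide)]
  | cons c v ih =>
    have hc : c ≠ '.' := fun h => hv (by rw [h]; exact List.mem_cons_self ..)
    have hv' : '.' ∉ v := fun h => hv (List.mem_cons_of_mem _ h)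
    rw [List.cons_append, List.takeWhile_cons, if_pos (decide_eq_true hc), ih hv']

-- a list containing '.' splits as (dot-free takeWhile) ++ '.' :: rest
lemma pv_split_at_last_free (r : List Char) (h : '.' ∈ r) :
    ∃ t, r = r.takeWhile (· ≠ '.') ++ '.' :: t := by
  induction r with
  | nil => exact absurd h (List.not_mem_nil)
  | cons c r ih =>
    by_cases hc : c = '.'
    · refine ⟨r, ?_⟩
      rw [hc, List.takeWhile_cons, if_neg (by decide), List.nil_append]
    · have h' : '.' ∈ r := by
        rcases List.mem_cons.mp h with h1 | h1
        · exact absurd h1.symm hc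
        · exact h1
      obtain ⟨t, ht⟩ := ih h'
      refine ⟨t, ?_⟩
      rw [List.takeWhile_cons, if_pos (decide_eq_true hc), List.cons_append]
      exact congrArg (c :: ·) ht

-- '.'::w is a suffix of l iff l has a dot and w is exactly the text after l's last dot
lemma pv_ext_suffix_iff (l w : List Char) (hw : '.' ∉ w) :
    '.' :: w <:+ l ↔ ('.' ∈ l ∧ (l.reverse.takeWhile (· ≠ '.')).reverse = w) := by
  rw [← List.reverse_prefix]
  constructor
  · rintro ⟨t, ht⟩
    have hrev : l.reverse = w.reverse ++ '.' :: t := by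
      rw [← ht, List.reverse_cons, List.append_assoc, List.singleton_append]
    have hmem : '.' ∈ l := by
      have : '.' ∈ l.reverse := by
        rw [hrev]
        exact List.mem_append_right _ (List.mem_cons_self ..)
      exact List.mem_reverse.mp this
    refine ⟨hmem, ?_⟩
    have htk : l.reverse.takeWhile (· ≠ '.') = w.reverse := by
      rw [hrev]
      exact pv_takeWhile_all w.reverse t (fun hx => hw (List.mem_reverse.mp hx))
    rw [htk, List.reverse_reverse]
  · rintro ⟨hmem, htw⟩
    obtain ⟨t, ht⟩ := pv_split_at_last_free l.reverse (List.mem_reverse.mpr hmem)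
    have htk : l.reverse.takeWhile (· ≠ '.') = w.reverse := by
      rw [← htw, List.reverse_reverse]
    refine ⟨t, ?_⟩
    rw [List.reverse_cons, List.append_assoc, List.singleton_append, ← htk, ← ht]

lemma pv_core (l : List Char) :
    (if PySem.Chars.endswith l ".pdf".toList then "pdf"
     else if ([".jpg", ".jpeg", ".png", ".gif", ".bmp", ".svg"].any
         (fun ext => PySem.Chars.endswith l ext.toList)) then "image"
     else "webpage")
    = (match (if '.' ∈ l then some ((l.reverse.takeWhile (· ≠ '.')).reverse) else none : Option (List Char)) with
       | some e => PySem.Dict.getD pvExtTable e "webpage"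
       | none => "webpage") := by
  by_cases hd : '.' ∈ l
  · rw [if_pos hd]
    set e := (l.reverse.takeWhile (· ≠ '.')).reverse with he
    show _ = PySem.Dict.getD pvExtTable e "webpage"
    have key : ∀ w : List Char, '.' ∉ w →
        (PySem.Chars.endswith l ('.' :: w) = true ↔ e = w) := by
      intro w hw
      rw [PySem.Chars.endswith_iff, pv_ext_suffix_iff l w hw, he]
      exact and_iff_right hd
    have keyF : ∀ w : List Char, '.' ∉ w → e ≠ w →
        PySem.Chars.endswith l ('.' :: w) = false := by
      intro w hw hne
      rw [← Bool.not_eq_true, key w hw]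
      exact hne
    by_cases h1 : e = ['p','d','f']
    · have ht1 : PySem.Chars.endswith l (".pdf".toList) = true := (key ['p','d','f'] (by decide)).mpr h1
      simp only [ht1, List.any_cons, List.any_nil,
        Bool.or_false, if_true]
      rw [h1]
      decide
    ·
      by_cases h2 : e = ['j','p','g']
      · have ht2 : PySem.Chars.endswith l (".jpg".toList) = true := (key ['j','p','g'] (by decide)).mpr h2
        have hh1 : PySem.Chars.endswith l (".pdf".toList) = false := keyF ['p','d','f'] (by decide) h1
        simp only [hh1, ht2, List.any_cons, List.any_nil, Bool.true_or,
          Bool.false_eq_true, Bool.or_false, if_true, if_false]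
        rw [h2]
        decide
      ·
        by_cases h3 : e = ['j','p','e','g']
        · have ht3 : PySem.Chars.endswith l (".jpeg".toList) = true := (key ['j','p','e','g'] (by decide)).mpr h3
          have hh1 : PySem.Chars.endswith l (".pdf".toList) = false := keyF ['p','d','f'] (by decide) h1
          have hh2 : PySem.Chars.endswith l (".jpg".toList) = false := keyF ['j','p','g'] (by decide) h2
          simp only [hh1, hh2, ht3, List.any_cons, List.any_nil, Bool.true_or, Bool.or_true,
            Bool.false_eq_true, Bool.or_false, if_true, if_false]
          rw [h3]
          decide
        ·
          by_cases h4 : e = ['p','n','g']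
          · have ht4 : PySem.Chars.endswith l (".png".toList) = true := (key ['p','n','g'] (by decide)).mpr h4
            have hh1 : PySem.Chars.endswith l (".pdf".toList) = false := keyF ['p','d','f'] (by decide) h1
            have hh2 : PySem.Chars.endswith l (".jpg".toList) = false := keyF ['j','p','g'] (by decide) h2
            have hh3 : PySem.Chars.endswith l (".jpeg".toList) = false := keyF ['j','p','e','g'] (by decide) h3
            simp only [hh1, hh2, hh3, ht4, List.any_cons, List.any_nil, Bool.true_or, Bool.or_true,
              Bool.false_eq_true, Bool.or_false, if_true, if_false]
            rw [h4]
            decide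
          ·
            by_cases h5 : e = ['g','i','f']
            · have ht5 : PySem.Chars.endswith l (".gif".toList) = true := (key ['g','i','f'] (by decide)).mpr h5
              have hh1 : PySem.Chars.endswith l (".pdf".toList) = false := keyF ['p','d','f'] (by decide) h1
              have hh2 : PySem.Chars.endswith l (".jpg".toList) = false := keyF ['j','p','g'] (by decide) h2
              have hh3 : PySem.Chars.endswith l (".jpeg".toList) = false := keyF ['j','p','e','g'] (by decide) h3
              have hh4 : PySem.Chars.endswith l (".png".toList) = false := keyF ['p','n','g'] (by decide) h4
              simp only [hh1, hh2, hh3, hh4, ht5, List.any_cons, List.any_nil, Bool.true_or, Bool.or_true,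
                Bool.false_eq_true, Bool.or_false, if_true, if_false]
              rw [h5]
              decide
            ·
              by_cases h6 : e = ['b','m','p']
              · have ht6 : PySem.Chars.endswith l (".bmp".toList) = true := (key ['b','m','p'] (by decide)).mpr h6
                have hh1 : PySem.Chars.endswith l (".pdf".toList) = false := keyF ['p','d','f'] (by decide) h1
                have hh2 : PySem.Chars.endswith l (".jpg".toList) = false := keyF ['j','p','g'] (by decide) h2
                have hh3 : PySem.Chars.endswith l (".jpeg".toList) = false := keyF ['j','p','e','g'] (by decide) h3
                have hh4 : PySem.Chars.endswith l (".png".toList) = false := keyF ['p','n','g'] (by decide) h4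
                have hh5 : PySem.Chars.endswith l (".gif".toList) = false := keyF ['g','i','f'] (by decide) h5
                simp only [hh1, hh2, hh3, hh4, hh5, ht6, List.any_cons, List.any_nil, Bool.true_or, Bool.or_true,
                  Bool.false_eq_true, Bool.or_false, if_true, if_false]
                rw [h6]
                decide
              ·
                by_cases h7 : e = ['s','v','g']
                · have ht7 : PySem.Chars.endswith l (".svg".toList) = true := (key ['s','v','g'] (by decide)).mpr h7
                  have hh1 : PySem.Chars.endswith l (".pdf".toList) = false := keyF ['p','d','f'] (by decide) h1
                  have hh2 : PySem.Chars.endswith l (".jpg".toList) = false := keyF ['j','p','g'] (by decide) h2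
                  have hh3 : PySem.Chars.endswith l (".jpeg".toList) = false := keyF ['j','p','e','g'] (by decide) h3
                  have hh4 : PySem.Chars.endswith l (".png".toList) = false := keyF ['p','n','g'] (by decide) h4
                  have hh5 : PySem.Chars.endswith l (".gif".toList) = false := keyF ['g','i','f'] (by decide) h5
                  have hh6 : PySem.Chars.endswith l (".bmp".toList) = false := keyF ['b','m','p'] (by decide) h6
                  simp only [hh1, hh2, hh3, hh4, hh5, hh6, ht7, List.any_cons, List.any_nil, Bool.or_true,
                    Bool.false_eq_true, Bool.or_false, if_true, if_false]
                  rw [h7]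
                  decide
                ·
                  have hh1 : PySem.Chars.endswith l (".pdf".toList) = false := keyF ['p','d','f'] (by decide) h1
                  have hh2 : PySem.Chars.endswith l (".jpg".toList) = false := keyF ['j','p','g'] (by decide) h2
                  have hh3 : PySem.Chars.endswith l (".jpeg".toList) = false := keyF ['j','p','e','g'] (by decide) h3
                  have hh4 : PySem.Chars.endswith l (".png".toList) = false := keyF ['p','n','g'] (by decide) h4
                  have hh5 : PySem.Chars.endswith l (".gif".toList) = false := keyF ['g','i','f'] (by decide) h5
                  have hh6 : PySem.Chars.endswith l (".bmp".toList) = false := keyF ['b','m','p'] (by decide) h6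
                  have hh7 : PySem.Chars.endswith l (".svg".toList) = false := keyF ['s','v','g'] (by decide) h7
                  simp only [hh1, hh2, hh3, hh4, hh5, hh6, hh7, List.any_cons, List.any_nil, Bool.or_false,
                    Bool.false_eq_true, if_false]
                  have htab : pvExtTable = PySem.Dict.mk [(['p','d','f'],"pdf"),(['j','p','g'],"image"),
                      (['j','p','e','g'],"image"),(['p','n','g'],"image"),(['g','i','f'],"image"),
                      (['b','m','p'],"image"),(['s','v','g'],"image")] := by rfl
                  rw [htab]
                  have b1 : (['p','d','f'] == e) = false := beq_eq_false_iff_ne.mpr (fun h => h1 h.symm)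
                  have b2 : (['j','p','g'] == e) = false := beq_eq_false_iff_ne.mpr (fun h => h2 h.symm)
                  have b3 : (['j','p','e','g'] == e) = false := beq_eq_false_iff_ne.mpr (fun h => h3 h.symm)
                  have b4 : (['p','n','g'] == e) = false := beq_eq_false_iff_ne.mpr (fun h => h4 h.symm)
                  have b5 : (['g','i','f'] == e) = false := beq_eq_false_iff_ne.mpr (fun h => h5 h.symm)
                  have b6 : (['b','m','p'] == e) = false := beq_eq_false_iff_ne.mpr (fun h => h6 h.symm)
                  have b7 : (['s','v','g'] == e) = false := beq_eq_false_iff_ne.mpr (fun h => h7 h.symm)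
                  simp [PySem.Dict.getD, PySem.Dict.get?, b1, b2, b3, b4, b5, b6, b7]
  · have hfalse : ∀ w : List Char, PySem.Chars.endswith l ('.' :: w) = false := by
      intro w
      rw [← Bool.not_eq_true, PySem.Chars.endswith_iff]
      rintro ⟨t, ht⟩
      exact hd (by rw [← ht]; simp)
    have hh1 : PySem.Chars.endswith l (".pdf".toList) = false := hfalse ['p','d','f']
    have hh2 : PySem.Chars.endswith l (".jpg".toList) = false := hfalse ['j','p','g']
    have hh3 : PySem.Chars.endswith l (".jpeg".toList) = false := hfalse ['j','p','e','g']
    have hh4 : PySem.Chars.endswith l (".png".toList) = false := hfalse ['p','n','g']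
    have hh5 : PySem.Chars.endswith l (".gif".toList) = false := hfalse ['g','i','f']
    have hh6 : PySem.Chars.endswith l (".bmp".toList) = false := hfalse ['b','m','p']
    have hh7 : PySem.Chars.endswith l (".svg".toList) = false := hfalse ['s','v','g']
    rw [if_neg hd]
    simp only [hh1, hh2, hh3, hh4, hh5, hh6, hh7, List.any_cons, List.any_nil,
      Bool.or_false, Bool.false_eq_true, if_false]

-- ===== VERDICT (by name: the statement is the Claim_ definition above) =====
theorem categorize_link_py_spec : Claim_equal_categorize_link_py := by
  intro url _
  unfold Spec_categorize_link_py categorize_link_py categorize_link_py_alt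
  simp only [PySem.Str.endswith_eq, PySem.Str.toList_lower]
  exact pv_core (PySem.Chars.lower url.toList)
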